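-- pv_equiv track=rewrite | github.com/ShiyuLiu2000/Duke-ECE-590 | HW5 code/eqsubstr.py | matching_length_sub_strs
-- ===== SOURCE A (Python) =====
-- def matching_length_sub_strs(s, c1, c2):
--     def find_sequences(s, c):
--         i = 0
--         while i < len(s):
--             if s[i] == c:
--                 start = i
--                 while i < len(s) and s[i] == c:
--                     i += 1
--                 yield (start, i - start)
--             i += 1
--     matches = set()
--     c1_sequences = list(find_sequences(s, c1))
--     c2_sequences = list(find_sequences(s, c2))
--     for c1_start, c1_length in c1_sequences:
--         for c2_start, c2_length in c2_sequences:
--             if c1_length == c2_length: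
--                 matches.add((c1_start, c2_start, c1_length))
--     return matches
-- ===== SOURCE B (Python) =====
-- def matching_length_sub_strs(s, c1, c2):
--     def runs(c):
--         out = []
--         start = None
--         for i, ch in enumerate(s):
--             if ch == c:
--                 if start is None:
--                     start = i
--             elif start is not None:
--                 out.append((start, i - start))
--                 start = None
--         if start is not None:
--             out.append((start, len(s) - start))
--         return out
--     buckets = {}
--     for start, length in runs(c2):
--         buckets.setdefault(length, []).append(start)
--     result = []
--     for start, length in runs(c1):
--         for s2 in buckets.get(length, ()):
--             result.append((start, s2, length))
--     return set(result)
-- ===== Notes on version B (the rewrite author's own statement) =====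
-- stated objective: faster
-- what changed: B finds runs in one enumerate pass with an open-run accumulator (instead of A's nested while-loop generator) and buckets the c2 runs by length in a dict so matching pairs are emitted directly, instead of A's all-pairs scan over c1-runs x c2-runs.
import Mathlib
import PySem

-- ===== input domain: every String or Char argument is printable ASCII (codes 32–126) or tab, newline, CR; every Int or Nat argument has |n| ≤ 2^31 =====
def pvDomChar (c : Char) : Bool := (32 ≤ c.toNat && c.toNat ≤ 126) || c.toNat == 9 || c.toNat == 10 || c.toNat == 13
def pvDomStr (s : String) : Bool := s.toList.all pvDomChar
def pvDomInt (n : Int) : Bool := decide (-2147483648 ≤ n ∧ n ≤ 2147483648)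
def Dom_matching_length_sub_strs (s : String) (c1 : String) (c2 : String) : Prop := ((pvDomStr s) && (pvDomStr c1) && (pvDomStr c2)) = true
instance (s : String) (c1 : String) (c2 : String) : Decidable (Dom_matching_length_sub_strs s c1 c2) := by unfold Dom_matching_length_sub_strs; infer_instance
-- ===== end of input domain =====

-- B replaces A's all-pairs scan over (c1-run, c2-run) by a single-pass run finder plus a
-- length-indexed dict of c2 runs, emitting only the matching pairs (output-sensitive).

-- ===== PORT A =====
-- Python's `s[i] == c`: the 1-character string at position i compared with the string c
def pvEqC (d : Char) (c : String) : Bool := String.ofList [d] == c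

-- A's generator find_sequences: outer while scans for a run start; the inner
-- `while i < len(s) and s[i] == c: i += 1` is the count of the contiguous matching
-- block (takeWhile length); the outer loop resumes one past the run's end.
def pvFindSeqsA (c : String) : List Char → Int → List (Int × Int)
  | [], _ => []
  | ch :: rest, i =>
    if pvEqC ch c then
      let k := (rest.takeWhile (fun d => pvEqC d c)).length
      (i, (k : Int) + 1) :: pvFindSeqsA c (rest.drop (k + 1)) (i + (k : Int) + 2)
    else pvFindSeqsA c rest (i + 1)
  termination_by cs => cs.length
  decreasing_by
  all_goals simp only [List.length_drop, List.length_cons]; omega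

def matching_length_sub_strs (s : String) (c1 : String) (c2 : String) : List (Int × Int × Int) :=
  let c1_sequences := pvFindSeqsA c1 s.toList 0
  let c2_sequences := pvFindSeqsA c2 s.toList 0
  c1_sequences.foldl
    (fun m p =>
      c2_sequences.foldl
        (fun m q => if p.2 = q.2 then PySem.Set.add m (p.1, q.1, p.2) else m) m)
    ([] : PySem.Set (Int × Int × Int))

-- ===== PORT B =====
-- B's run finder: one pass over enumerate(s) with state (finished runs, open-run start)
def pvStepB (c : String) (st : List (Int × Int) × Option Int) (p : Int × Char) :
    List (Int × Int) × Option Int :=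
  if pvEqC p.2 c then
    match st.2 with
    | none => (st.1, some p.1)
    | some _ => st
  else
    match st.2 with
    | none => st
    | some a => (st.1 ++ [(a, p.1 - a)], none)

def pvRunsB (s : String) (c : String) : List (Int × Int) :=
  let fin := (PySem.List.enumerate s.toList 0).foldl (pvStepB c) ([], none)
  match fin.2 with
  | none => fin.1
  | some a => fin.1 ++ [(a, (s.toList.length : Int) - a)]

def matching_length_sub_strs_alt (s : String) (c1 : String) (c2 : String) : List (Int × Int × Int) :=
  let buckets :=
    (pvRunsB s c2).foldl
      (fun d p => d.modify p.2 ([] : List Int) (fun l => l ++ [p.1])) PySem.Dict.empty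
  let result :=
    (pvRunsB s c1).foldl
      (fun acc p => acc ++ (buckets.getD p.2 []).map (fun s2 => (p.1, s2, p.2))) []
  PySem.Set.ofList result

-- ===== PRECONDITION & SPEC =====
def Spec_matching_length_sub_strs (s : String) (c1 : String) (c2 : String) (out : List (Int × Int × Int)) : Prop := out = matching_length_sub_strs_alt s c1 c2
instance (s : String) (c1 : String) (c2 : String) (out : List (Int × Int × Int)) : Decidable (Spec_matching_length_sub_strs s c1 c2 out) := by unfold Spec_matching_length_sub_strs; infer_instance

-- ===== CLAIM (what is proved, stated in full; the proofs are below) =====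
def Claim_equal_matching_length_sub_strs : Prop := ∀ (s : String) (c1 : String) (c2 : String), Dom_matching_length_sub_strs s c1 c2 → Spec_matching_length_sub_strs s c1 c2 (matching_length_sub_strs s c1 c2)

-- ===== LEMMAS AND PROOFS =====

-- flush of B's fold state at absolute end position i + cs.length
def pvFlushB (c : String) (cs : List Char) (i : Int) (st : List (Int × Int) × Option Int) :
    List (Int × Int) :=
  match (PySem.List.enumerate cs i).foldl (pvStepB c) st with
  | (out, none) => out
  | (out, some a) => out ++ [(a, i + (cs.length : Int) - a)]

def pvSomeRHS (c : String) (cs : List Char) (i a : Int) (acc : List (Int × Int)) :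
    List (Int × Int) :=
  let k := (cs.takeWhile (fun d => pvEqC d c)).length
  acc ++ (a, i + (k : Int) - a) :: pvFindSeqsA c (cs.drop (k + 1)) (i + (k : Int) + 1)

theorem pvFlushB_cons (c : String) (ch : Char) (rest : List Char) (i : Int)
    (st : List (Int × Int) × Option Int) :
    pvFlushB c (ch :: rest) i st = pvFlushB c rest (i + 1) (pvStepB c st (i, ch)) := by
  unfold pvFlushB
  rw [PySem.List.enumerate_cons, List.foldl_cons]
  cases hfold : (PySem.List.enumerate rest (i + 1)).foldl (pvStepB c) (pvStepB c st (i, ch)) with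
  | mk out o =>
    cases o with
    | none => rfl
    | some a => simp; ring_nf

theorem pvFlushB_cases (c : String) (n : Nat) :
    ∀ cs : List Char, cs.length ≤ n →
      (∀ (i : Int) (acc : List (Int × Int)),
        pvFlushB c cs i (acc, none) = acc ++ pvFindSeqsA c cs i) ∧
      (∀ (i : Int) (acc : List (Int × Int)) (a : Int),
        pvFlushB c cs i (acc, some a) = pvSomeRHS c cs i a acc) := by
  induction n with
  | zero =>
    intro cs hlen
    have hnil : cs = [] := List.length_eq_zero_iff.mp (Nat.le_zero.mp hlen)
    subst hnil
    constructor
    · intro i acc; simp [pvFlushB, pvFindSeqsA, PySem.List.enumerate]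
    · intro i acc a; simp [pvFlushB, pvSomeRHS, pvFindSeqsA, PySem.List.enumerate]
  | succ n ih =>
    intro cs hlen
    match cs with
    | [] =>
      constructor
      · intro i acc; simp [pvFlushB, pvFindSeqsA, PySem.List.enumerate]
      · intro i acc a; simp [pvFlushB, pvSomeRHS, pvFindSeqsA, PySem.List.enumerate]
    | ch :: rest =>
      have hr : rest.length ≤ n := by simp at hlen; omega
      constructor
      · intro i acc
        by_cases h : pvEqC ch c
        · rw [pvFlushB_cons]
          have hstep : pvStepB c (acc, none) (i, ch) = (acc, some i) := by
            simp [pvStepB, h]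
          rw [hstep, (ih rest hr).2 (i + 1) acc i]
          rw [pvFindSeqsA]
          simp only [pvSomeRHS, h, if_true]
          have h1 : i + 1 + ((rest.takeWhile (fun d => pvEqC d c)).length : Int) - i
              = ((rest.takeWhile (fun d => pvEqC d c)).length : Int) + 1 := by ring
          have h2 : i + 1 + ((rest.takeWhile (fun d => pvEqC d c)).length : Int) + 1
              = i + ((rest.takeWhile (fun d => pvEqC d c)).length : Int) + 2 := by ring
          rw [h1, h2]
        · rw [pvFlushB_cons]
          have hstep : pvStepB c (acc, none) (i, ch) = (acc, none) := by
            simp [pvStepB, h]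
          rw [hstep, (ih rest hr).1 (i + 1) acc]
          rw [pvFindSeqsA]
          simp [h]
      · intro i acc a
        by_cases h : pvEqC ch c
        · rw [pvFlushB_cons]
          have hstep : pvStepB c (acc, some a) (i, ch) = (acc, some a) := by
            simp [pvStepB, h]
          rw [hstep, (ih rest hr).2 (i + 1) acc a]
          simp only [pvSomeRHS, List.takeWhile_cons, h, if_true, List.length_cons,
            List.drop_succ_cons]
          have h1 : i + 1 + ((rest.takeWhile (fun d => pvEqC d c)).length : Int)
              = i + (((rest.takeWhile (fun d => pvEqC d c)).length + 1 : Nat) : Int) := by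
            push_cast; ring
          rw [h1]
        · rw [pvFlushB_cons]
          have hstep : pvStepB c (acc, some a) (i, ch) = (acc ++ [(a, i - a)], none) := by
            simp [pvStepB, h]
          rw [hstep, (ih rest hr).1 (i + 1)]
          simp only [pvSomeRHS, List.takeWhile_cons, h, List.drop_succ_cons]
          simp

theorem pvRunsB_eq_findSeqsA (s c : String) :
    pvRunsB s c = pvFindSeqsA c s.toList 0 := by
  have h := (pvFlushB_cases c s.toList.length s.toList le_rfl).1 0 []
  simp only [List.nil_append] at h
  rw [← h]
  unfold pvRunsB pvFlushB
  cases hfold : (PySem.List.enumerate s.toList 0).foldl (pvStepB c) ([], none) with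
  | mk out o =>
    cases o with
    | none => rfl
    | some a => simp

-- run starts are at least the scan position, and strictly increasing
theorem pvFindSeqsA_fst_ge (c : String) (n : Nat) :
    ∀ cs : List Char, cs.length ≤ n → ∀ (i : Int), ∀ p ∈ pvFindSeqsA c cs i, i ≤ p.1 := by
  induction n with
  | zero =>
    intro cs hlen i p hp
    have hnil : cs = [] := List.length_eq_zero_iff.mp (Nat.le_zero.mp hlen)
    subst hnil; simp [pvFindSeqsA] at hp
  | succ n ih =>
    intro cs hlen i p hp
    match cs with
    | [] => simp [pvFindSeqsA] at hp
    | ch :: rest =>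
      have hr : rest.length ≤ n := by simp at hlen; omega
      rw [pvFindSeqsA] at hp
      by_cases h : pvEqC ch c
      · simp only [h, if_true, List.mem_cons] at hp
        rcases hp with hp | hp
        · subst hp; rfl
        · have := ih (rest.drop ((rest.takeWhile (fun d => pvEqC d c)).length + 1))
            (by simp; omega) _ p hp
          omega
      · simp only [h] at hp
        have := ih rest hr (i + 1) p hp
        omega

theorem pvFindSeqsA_pairwise (c : String) (n : Nat) :
    ∀ cs : List Char, cs.length ≤ n → ∀ (i : Int),
      (pvFindSeqsA c cs i).Pairwise (fun p q => p.1 < q.1) := by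
  induction n with
  | zero =>
    intro cs hlen i
    have hnil : cs = [] := List.length_eq_zero_iff.mp (Nat.le_zero.mp hlen)
    subst hnil; simp [pvFindSeqsA]
  | succ n ih =>
    intro cs hlen i
    match cs with
    | [] => simp [pvFindSeqsA]
    | ch :: rest =>
      have hr : rest.length ≤ n := by simp at hlen; omega
      rw [pvFindSeqsA]
      by_cases h : pvEqC ch c
      · simp only [h]
        have hdroplen : (rest.drop ((rest.takeWhile (fun d => pvEqC d c)).length + 1)).length ≤ n := by
          simp; omega
        refine List.pairwise_cons.mpr ⟨?_, ih _ hdroplen _⟩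
        intro q hq
        have := pvFindSeqsA_fst_ge c _ (rest.drop ((rest.takeWhile (fun d => pvEqC d c)).length + 1)) le_rfl _ q hq
        omega
      · simp only [h]
        exact ih rest hr (i + 1)

-- the common intermediate form: all matching pairs, grouped by the c1 run
def pvMatches (c1s c2s : List (Int × Int)) : List (Int × Int × Int) :=
  c1s.flatMap (fun p => (c2s.filter (fun q => q.2 == p.2)).map (fun q => (p.1, q.1, p.2)))

theorem pvInnerFold (p : Int × Int) (c2s : List (Int × Int)) :
    ∀ m : List (Int × Int × Int),
      (∀ q ∈ c2s, (p.1, q.1, p.2) ∉ m) → c2s.Pairwise (fun a b => a.1 < b.1) →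
      c2s.foldl (fun m q => if p.2 = q.2 then PySem.Set.add m (p.1, q.1, p.2) else m) m =
        m ++ (c2s.filter (fun q => q.2 == p.2)).map (fun q => (p.1, q.1, p.2)) := by
  induction c2s with
  | nil => intro m _ _; simp
  | cons q rest ih =>
    intro m hnotin hpw
    rw [List.foldl_cons]
    by_cases hq : p.2 = q.2
    · have hadd : PySem.Set.add m (p.1, q.1, p.2) = m ++ [(p.1, q.1, p.2)] :=
        PySem.Set.add_of_not_mem (hnotin q (List.mem_cons_self) )
      rw [if_pos hq, hadd]
      rw [ih (m ++ [(p.1, q.1, p.2)])]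
      · have hbq : (q.2 == p.2) = true := by simp [hq.symm]
        simp only [List.filter_cons, hbq]
        simp
      · intro q' hq' hmem
        rcases List.mem_append.mp hmem with hmem | hmem
        · exact hnotin q' (List.mem_cons_of_mem _ hq') hmem
        · have hlt : q.1 < q'.1 := (List.pairwise_cons.mp hpw).1 q' hq'
          simp at hmem
          omega
      · exact (List.pairwise_cons.mp hpw).2
    · have hne : (q.2 == p.2) = false := by
        simp; intro hc; exact hq hc.symm
      rw [if_neg hq]
      simp only [List.filter_cons, hne]
      exact ih m (fun q' hq' => hnotin q' (List.mem_cons_of_mem _ hq'))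
        (List.pairwise_cons.mp hpw).2

theorem pvOuterFold (c2s : List (Int × Int)) (hc2 : c2s.Pairwise (fun a b => a.1 < b.1)) :
    ∀ (c1s : List (Int × Int)) (m : List (Int × Int × Int)),
      c1s.Pairwise (fun a b => a.1 < b.1) → (∀ p ∈ c1s, ∀ x ∈ m, x.1 ≠ p.1) →
      c1s.foldl
        (fun m p =>
          c2s.foldl (fun m q => if p.2 = q.2 then PySem.Set.add m (p.1, q.1, p.2) else m) m) m =
        m ++ pvMatches c1s c2s := by
  intro c1s
  induction c1s with
  | nil => intro m _ _; simp [pvMatches]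
  | cons p rest ih =>
    intro m hpw hfresh
    rw [List.foldl_cons]
    rw [pvInnerFold p c2s m
      (fun q hq hmem => hfresh p (List.mem_cons_self) _ hmem rfl) hc2]
    rw [ih _ (List.pairwise_cons.mp hpw).2]
    · simp [pvMatches, List.flatMap_cons]
    · intro p' hp' x hx
      rcases List.mem_append.mp hx with hx | hx
      · exact hfresh p' (List.mem_cons_of_mem _ hp') x hx
      · have hlt : p.1 < p'.1 := (List.pairwise_cons.mp hpw).1 p' hp'
        simp only [List.mem_map] at hx
        rcases hx with ⟨q, _, rfl⟩
        simp
        omega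

theorem pvMatches_nodup (c1s c2s : List (Int × Int))
    (h1 : c1s.Pairwise (fun a b => a.1 < b.1)) (h2 : c2s.Pairwise (fun a b => a.1 < b.1)) :
    (pvMatches c1s c2s).Nodup := by
  have hpw : (pvMatches c1s c2s).Pairwise
      (fun x y => x.1 < y.1 ∨ (x.1 = y.1 ∧ x.2.1 < y.2.1)) := by
    induction c1s with
    | nil => simp [pvMatches]
    | cons p rest ih =>
      simp only [pvMatches, List.flatMap_cons]
      rw [List.pairwise_append]
      refine ⟨?_, ih (List.pairwise_cons.mp h1).2, ?_⟩
      · rw [List.pairwise_map]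
        have := (h2.filter (fun q => q.2 == p.2)).imp (fun hab => hab)
        exact List.Pairwise.imp (fun hab => Or.inr ⟨rfl, hab⟩)
          (h2.filter (fun q => q.2 == p.2))
      · intro x hx y hy
        simp only [List.mem_map] at hx
        rcases hx with ⟨q, _, rfl⟩
        simp only [List.mem_flatMap, List.mem_map] at hy
        rcases hy with ⟨p', hp', q', _, rfl⟩
        have hlt : p.1 < p'.1 := (List.pairwise_cons.mp h1).1 p' hp'
        exact Or.inl hlt
  exact hpw.imp (by
    rintro ⟨a, b, l⟩ ⟨a', b', l'⟩ hr heq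
    cases heq
    rcases hr with hr | ⟨_, hr⟩ <;> omega)

theorem pvAltEqMatches (s c1 c2 : String) :
    matching_length_sub_strs_alt s c1 c2 =
      PySem.Set.ofList (pvMatches (pvRunsB s c1) (pvRunsB s c2)) := by
  simp only [matching_length_sub_strs_alt]
  congr 1
  have hbucket : ∀ L : Int,
      ((pvRunsB s c2).foldl
        (fun d p => d.modify p.2 ([] : List Int) (fun l => l ++ [p.1]))
        PySem.Dict.empty).getD L [] =
      (((pvRunsB s c2)).filter (fun q => q.2 == L)).map (fun q => q.1) := by
    intro L
    have hswap : (pvRunsB s c2).foldl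
        (fun d p => d.modify p.2 ([] : List Int) (fun l => l ++ [p.1]))
        PySem.Dict.empty =
        ((pvRunsB s c2).map Prod.swap).foldl
          (fun d p => d.modify p.1 ([] : List Int) (fun l => l ++ [p.2]))
          PySem.Dict.empty := by
      rw [List.foldl_map]
      rfl
    rw [hswap, PySem.Dict.getD_foldl_modify_append, List.filter_map, List.map_map]
    simp only [PySem.Dict.getD_empty, List.nil_append]
    rfl
  rw [PySem.List.foldl_append_eq_flatMap]
  simp only [List.nil_append, pvMatches]
  congr 1
  funext p
  rw [hbucket p.2, List.map_map]
  rfl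

-- ===== VERDICT (by name: the statement is the Claim_ definition above) =====
theorem matching_length_sub_strs_spec : Claim_equal_matching_length_sub_strs := by
  intro s c1 c2 _
  unfold Spec_matching_length_sub_strs
  have h1 : (pvFindSeqsA c1 s.toList 0).Pairwise (fun a b => a.1 < b.1) :=
    pvFindSeqsA_pairwise c1 s.toList.length s.toList le_rfl 0
  have h2 : (pvFindSeqsA c2 s.toList 0).Pairwise (fun a b => a.1 < b.1) :=
    pvFindSeqsA_pairwise c2 s.toList.length s.toList le_rfl 0
  have hA : matching_length_sub_strs s c1 c2 =
      pvMatches (pvFindSeqsA c1 s.toList 0) (pvFindSeqsA c2 s.toList 0) := by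
    unfold matching_length_sub_strs
    have := pvOuterFold (pvFindSeqsA c2 s.toList 0) h2 (pvFindSeqsA c1 s.toList 0)
      ([] : List (Int × Int × Int)) h1 (by intro p _ x hx; simp at hx)
    simpa using this
  rw [hA, pvAltEqMatches, pvRunsB_eq_findSeqsA, pvRunsB_eq_findSeqsA]
  exact (PySem.Set.ofList_eq_self_of_nodup _
    (pvMatches_nodup _ _ h1 h2)).symm
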